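-- pv_equiv track=rewrite | github.com/JakubBlaha/Marvin | src/message_fixer.py | clean_iter
-- ===== SOURCE A (Python) =====
-- def clean_iter(string: str) -> tuple:
--     _ = False  # ignoring
--     for i, ch in enumerate(string):
--         if ch in '<>':
--             _ = not _
--             continue
--         if _:
--             continue
--         yield (i, ch)
-- ===== SOURCE B (Python) =====
-- def clean_iter(string: str) -> tuple:
--     # Skip-ahead scanner: on a bracket, an inner scan jumps past the next
--     # bracket; only the outside mode yields. No toggle state variable.
--     n = len(string)
--     i = 0
--     while i < n:
--         ch = string[i]
--         if ch in '<>':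
--             i += 1
--             while i < n and string[i] not in '<>':
--                 i += 1
--             i += 1
--         else:
--             yield (i, ch)
--             i += 1
-- ===== Notes on version B (the rewrite author's own statement) =====
-- stated objective: alternative
-- what changed: Replaces A's single enumerate loop with a boolean toggle state by a two-mode skip-ahead scanner: a while loop over indices whose bracket branch runs an inner scan that jumps past the closing bracket, so no state flag is kept.
import Mathlib
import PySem

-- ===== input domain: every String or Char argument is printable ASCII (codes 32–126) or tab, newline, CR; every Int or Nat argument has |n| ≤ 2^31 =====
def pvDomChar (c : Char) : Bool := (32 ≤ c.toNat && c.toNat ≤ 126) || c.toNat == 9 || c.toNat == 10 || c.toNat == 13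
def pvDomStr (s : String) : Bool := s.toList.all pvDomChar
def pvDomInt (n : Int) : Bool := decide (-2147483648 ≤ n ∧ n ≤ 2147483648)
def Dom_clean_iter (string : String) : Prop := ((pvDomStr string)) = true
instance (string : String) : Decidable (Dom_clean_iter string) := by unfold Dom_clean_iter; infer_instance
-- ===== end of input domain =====

-- B replaces A's toggle-flag pass by a two-mode skip-ahead scanner (alternative decomposition, same cost).

-- ===== PORT A =====
-- A's for-loop over enumerate(string) with the toggle `_`, as structural
-- recursion over the remaining chars carrying (index, toggle, accumulated yields);
-- `ch in '<>'` on a single char is exactly the two equality tests (exact here)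
def cleanGoA : List Char → Int → Bool → List (Int × String) → List (Int × String)
  | [], _, _, acc => acc
  | c :: rest, i, t, acc =>
    if c = '<' ∨ c = '>' then cleanGoA rest (i + 1) (!t) acc
    else if t then cleanGoA rest (i + 1) t acc
    else cleanGoA rest (i + 1) t (acc ++ [(i, String.mk [c])])

def clean_iter (string : String) : List (Int × String) :=
  cleanGoA string.toList 0 false []

-- ===== PORT B =====
-- Source B's outer while loop (outside mode, emits) and its inner bracket-skipping
-- while loop, as mutual recursion over the remaining chars carrying the index
mutual
def cleanOutB : List Char → Int → List (Int × String)
  | [], _ => []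
  | c :: rest, i =>
    if c = '<' ∨ c = '>' then cleanSkipB rest (i + 1)
    else (i, String.mk [c]) :: cleanOutB rest (i + 1)

def cleanSkipB : List Char → Int → List (Int × String)
  | [], _ => []
  | c :: rest, i =>
    if c = '<' ∨ c = '>' then cleanOutB rest (i + 1)
    else cleanSkipB rest (i + 1)
end

def clean_iter_alt (string : String) : List (Int × String) :=
  cleanOutB string.toList 0

-- ===== PRECONDITION & SPEC =====
def Spec_clean_iter (string : String) (out : List (Int × String)) : Prop := out = clean_iter_alt string
instance (string : String) (out : List (Int × String)) : Decidable (Spec_clean_iter string out) := by unfold Spec_clean_iter; infer_instance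

-- ===== CLAIM (what is proved, stated in full; the proofs are below) =====
def Claim_equal_clean_iter : Prop := ∀ (string : String), Dom_clean_iter string → Spec_clean_iter string (clean_iter string)

-- ===== LEMMAS AND PROOFS =====
-- invariant: A's run with toggle off appends B's outside-mode output,
-- with toggle on appends B's skip-mode output
theorem cleanGoA_eq_B : ∀ (l : List Char) (i : Int) (acc : List (Int × String)),
    cleanGoA l i false acc = acc ++ cleanOutB l i ∧
    cleanGoA l i true acc = acc ++ cleanSkipB l i := by
  intro l
  induction l with
  | nil => intro i acc; simp [cleanGoA, cleanOutB, cleanSkipB]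
  | cons c rest ih =>
    intro i acc
    by_cases h : c = '<' ∨ c = '>'
    · simp only [cleanGoA, cleanOutB, cleanSkipB, h, if_pos, Bool.not_false, Bool.not_true]
      exact ⟨(ih (i + 1) acc).2, (ih (i + 1) acc).1⟩
    · simp only [cleanGoA, cleanOutB, cleanSkipB, h, if_neg, if_false, Bool.false_eq_true,
        if_true]
      constructor
      · rw [(ih (i + 1) (acc ++ [(i, String.mk [c])])).1]; simp
      · exact (ih (i + 1) acc).2

-- ===== VERDICT (by name: the statement is the Claim_ definition above) =====
theorem clean_iter_spec : Claim_equal_clean_iter := by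
  intro s _
  unfold Spec_clean_iter clean_iter clean_iter_alt
  simpa using (cleanGoA_eq_B s.toList 0 []).1
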